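-- pv_equiv track=rewrite | github.com/marco-jardim/Paper2Slides | api/ingestor/tex_parser.py | _classify_section
-- ===== SOURCE A (Python) =====
-- def _classify_section(heading: str) -> str:
--     """Map a LaTeX section name to a checkpoint category."""
--     h = heading.lower()
--     if "abstract" in h:
--         return "abstract"
--     if any(
--         k in h
--         for k in (
--             "introduction",
--             "background",
--             "related work",
--             "related",
--             "motivation",
--             "prior work",
--         )
--     ):
--         return "motivation"
--     if any(
--         k in h
--         for k in (
--             "method",
--             "approach",
--             "model",
--             "architecture",
--             "system",
--             "proposed",
--             "framework",
--             "design",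
--         )
--     ):
--         return "solution"
--     if any(
--         k in h
--         for k in (
--             "result",
--             "experiment",
--             "evaluation",
--             "performance",
--             "benchmark",
--             "analysis",
--             "ablation",
--         )
--     ):
--         return "results"
--     if any(
--         k in h
--         for k in ("conclusion", "contribution", "summary", "discussion", "future")
--     ):
--         return "contributions"
--     return "paper_info"
-- ===== SOURCE B (Python) =====
-- _KEYWORD_PRIORITY = {
--     "abstract": 0,
--     "introduction": 1, "background": 1, "related work": 1, "related": 1,
--     "motivation": 1, "prior work": 1,
--     "method": 2, "approach": 2, "model": 2, "architecture": 2, "system": 2,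
--     "proposed": 2, "framework": 2, "design": 2,
--     "result": 3, "experiment": 3, "evaluation": 3, "performance": 3,
--     "benchmark": 3, "analysis": 3, "ablation": 3,
--     "conclusion": 4, "contribution": 4, "summary": 4, "discussion": 4,
--     "future": 4,
-- }
--
-- _LABELS = ("abstract", "motivation", "solution", "results", "contributions",
--            "paper_info")
--
--
-- def _classify_section(heading: str) -> str:
--     """Map a LaTeX section name to a checkpoint category."""
--     h = heading.lower()
--     best = 5
--     for kw, pri in _KEYWORD_PRIORITY.items():
--         if pri < best and kw in h:
--             best = pri
--     return _LABELS[best]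
-- ===== Notes on version B (the rewrite author's own statement) =====
-- stated objective: alternative
-- what changed: Replaces the five-branch cascade with early return by a flat keyword-to-priority map folded once with a min-priority accumulator (no category groups, no early exit), the numeric result indexing a label tuple.
import Mathlib
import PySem

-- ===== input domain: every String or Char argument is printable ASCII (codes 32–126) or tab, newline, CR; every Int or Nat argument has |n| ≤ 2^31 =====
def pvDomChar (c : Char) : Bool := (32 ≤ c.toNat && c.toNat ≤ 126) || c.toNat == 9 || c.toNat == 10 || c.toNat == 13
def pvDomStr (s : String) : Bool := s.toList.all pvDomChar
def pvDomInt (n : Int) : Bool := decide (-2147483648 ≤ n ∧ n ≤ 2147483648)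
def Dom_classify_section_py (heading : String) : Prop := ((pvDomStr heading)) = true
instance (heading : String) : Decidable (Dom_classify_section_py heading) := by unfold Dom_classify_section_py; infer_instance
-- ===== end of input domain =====

-- B replaces A's early-return keyword-group cascade by a single fold over a flat
-- keyword→priority map with a min-priority accumulator, then a label-array lookup (alternative decomposition, same cost).

-- ===== PORT A =====
def classify_section_py (heading : String) : String :=
  let h := PySem.Str.lower heading
  if PySem.Str.isIn "abstract" h then "abstract"
  else if ["introduction", "background", "related work", "related", "motivation", "prior work"].any (fun k => PySem.Str.isIn k h) then "motivation"
  else if ["method", "approach", "model", "architecture", "system", "proposed", "framework", "design"].any (fun k => PySem.Str.isIn k h) then "solution"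
  else if ["result", "experiment", "evaluation", "performance", "benchmark", "analysis", "ablation"].any (fun k => PySem.Str.isIn k h) then "results"
  else if ["conclusion", "contribution", "summary", "discussion", "future"].any (fun k => PySem.Str.isIn k h) then "contributions"
  else "paper_info"

-- ===== PORT B =====
-- the dict _KEYWORD_PRIORITY, in insertion order
def pvKeywordPriority : List (String × Nat) :=
  [("abstract", 0),
   ("introduction", 1), ("background", 1), ("related work", 1), ("related", 1),
   ("motivation", 1), ("prior work", 1),
   ("method", 2), ("approach", 2), ("model", 2), ("architecture", 2), ("system", 2),
   ("proposed", 2), ("framework", 2), ("design", 2),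
   ("result", 3), ("experiment", 3), ("evaluation", 3), ("performance", 3),
   ("benchmark", 3), ("analysis", 3), ("ablation", 3),
   ("conclusion", 4), ("contribution", 4), ("summary", 4), ("discussion", 4),
   ("future", 4)]

def pvLabels : List String :=
  ["abstract", "motivation", "solution", "results", "contributions", "paper_info"]

-- the `for kw, pri in …: if pri < best and kw in h: best = pri` loop
def pvBestLoop (h : String) : List (String × Nat) → Nat → Nat
  | [], best => best
  | (k, p) :: rest, best =>
      pvBestLoop h rest (if decide (p < best) && PySem.Str.isIn k h then p else best)

def classify_section_py_alt (heading : String) : String :=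
  let h := PySem.Str.lower heading
  -- _LABELS[best]: best is always 0..5, in range, so the getD default is never reached
  pvLabels.getD (pvBestLoop h pvKeywordPriority 5) ""

-- ===== PRECONDITION & SPEC =====
def Spec_classify_section_py (heading : String) (out : String) : Prop := out = classify_section_py_alt heading
instance (heading : String) (out : String) : Decidable (Spec_classify_section_py heading out) := by unfold Spec_classify_section_py; infer_instance

-- ===== CLAIM (what is proved, stated in full; the proofs are below) =====
def Claim_equal_classify_section_py : Prop := ∀ (heading : String), Dom_classify_section_py heading → Spec_classify_section_py heading (classify_section_py heading)

-- ===== LEMMAS AND PROOFS =====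

-- proof-only names for the five uniform-priority segments of pvKeywordPriority
def pvS0 : List (String × Nat) := [("abstract", 0)]
def pvS1 : List (String × Nat) := [("introduction", 1), ("background", 1), ("related work", 1), ("related", 1), ("motivation", 1), ("prior work", 1)]
def pvS2 : List (String × Nat) := [("method", 2), ("approach", 2), ("model", 2), ("architecture", 2), ("system", 2), ("proposed", 2), ("framework", 2), ("design", 2)]
def pvS3 : List (String × Nat) := [("result", 3), ("experiment", 3), ("evaluation", 3), ("performance", 3), ("benchmark", 3), ("analysis", 3), ("ablation", 3)]
def pvS4 : List (String × Nat) := [("conclusion", 4), ("contribution", 4), ("summary", 4), ("discussion", 4), ("future", 4)]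

theorem pvBestLoop_append (h : String) (s t : List (String × Nat)) (b : Nat) :
    pvBestLoop h (s ++ t) b = pvBestLoop h t (pvBestLoop h s b) := by
  induction s generalizing b with
  | nil => rfl
  | cons kp rest ih => cases kp; simp [pvBestLoop, ih]

-- a segment none of whose keywords occurs leaves the accumulator unchanged
theorem pvBestLoop_miss (h : String) (seg : List (String × Nat)) (b : Nat)
    (hm : seg.any (fun kp => PySem.Str.isIn kp.1 h) = false) :
    pvBestLoop h seg b = b := by
  induction seg generalizing b with
  | nil => rfl
  | cons kp rest ih =>
      cases kp with
      | mk k p =>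
        rw [List.any_cons, Bool.or_eq_false_iff] at hm
        rw [pvBestLoop, hm.1]
        simp only [Bool.and_false, Bool.false_eq_true, if_false]
        exact ih b hm.2

-- once the accumulator is ≤ every priority in the segment it never changes
theorem pvBestLoop_noupdate (h : String) (seg : List (String × Nat)) (b : Nat)
    (hge : ∀ kp ∈ seg, ¬ kp.2 < b) :
    pvBestLoop h seg b = b := by
  induction seg generalizing b with
  | nil => rfl
  | cons kp rest ih =>
      cases kp with
      | mk k p =>
        have hk : ¬ p < b := hge (k, p) (by simp)
        rw [pvBestLoop, decide_eq_false hk]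
        simp only [Bool.false_and, Bool.false_eq_true, if_false]
        exact ih b (fun kp hkp => hge kp (List.mem_cons_of_mem _ hkp))

-- a segment of uniform priority i < b with at least one occurring keyword sets the accumulator to i
theorem pvBestLoop_hit (h : String) (seg : List (String × Nat)) (i b : Nat)
    (huni : ∀ kp ∈ seg, kp.2 = i)
    (hany : seg.any (fun kp => PySem.Str.isIn kp.1 h) = true)
    (hib : i < b) :
    pvBestLoop h seg b = i := by
  induction seg generalizing b with
  | nil => simp at hany
  | cons kp rest ih =>
      cases kp with
      | mk k p =>
        have hp : p = i := huni (k, p) (by simp)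
        subst hp
        by_cases hk : PySem.Str.isIn k h = true
        · rw [pvBestLoop, decide_eq_true hib, hk]
          simp only [Bool.and_self, if_true]
          exact pvBestLoop_noupdate h rest p
            (fun kp hkp => by rw [huni kp (List.mem_cons_of_mem _ hkp)]; omega)
        · have hk' : PySem.Str.isIn k h = false := by
            rw [Bool.not_eq_true] at hk; exact hk
          rw [pvBestLoop, hk']
          simp only [Bool.and_false, Bool.false_eq_true, if_false]
          rw [List.any_cons, hk', Bool.false_or] at hany
          exact ih b (fun kp h1 => huni kp (List.mem_cons_of_mem _ h1)) hany hib

-- ===== VERDICT (by name: the statement is the Claim_ definition above) =====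
theorem classify_section_py_spec : Claim_equal_classify_section_py := by
  intro heading _
  unfold Spec_classify_section_py classify_section_py classify_section_py_alt
  dsimp only
  generalize PySem.Str.lower heading = h
  rw [show pvKeywordPriority = pvS0 ++ pvS1 ++ pvS2 ++ pvS3 ++ pvS4 from rfl,
    pvBestLoop_append, pvBestLoop_append, pvBestLoop_append, pvBestLoop_append]
  by_cases h0 : PySem.Str.isIn "abstract" h = true
  · rw [pvBestLoop_hit h pvS0 0 5 (by decide) (by simpa [pvS0] using h0) (by omega),
        pvBestLoop_noupdate h pvS1 0 (by decide), pvBestLoop_noupdate h pvS2 0 (by decide),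
        pvBestLoop_noupdate h pvS3 0 (by decide), pvBestLoop_noupdate h pvS4 0 (by decide),
        if_pos h0]
    simp [pvLabels]
  · have h0' : PySem.Str.isIn "abstract" h = false := by rw [Bool.not_eq_true] at h0; exact h0
    rw [pvBestLoop_miss h pvS0 5 (by simpa [pvS0] using h0'), if_neg h0]
    by_cases h1 : (["introduction", "background", "related work", "related", "motivation", "prior work"].any (fun k => PySem.Str.isIn k h)) = true
    · rw [pvBestLoop_hit h pvS1 1 5 (by decide) (by simpa [pvS1] using h1) (by omega),
          pvBestLoop_noupdate h pvS2 1 (by decide), pvBestLoop_noupdate h pvS3 1 (by decide),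
          pvBestLoop_noupdate h pvS4 1 (by decide), if_pos h1]
      simp [pvLabels]
    · have h1' : (["introduction", "background", "related work", "related", "motivation", "prior work"].any (fun k => PySem.Str.isIn k h)) = false := by
        rw [Bool.not_eq_true] at h1; exact h1
      rw [pvBestLoop_miss h pvS1 5 (by simpa [pvS1] using h1'), if_neg h1]
      by_cases h2 : (["method", "approach", "model", "architecture", "system", "proposed", "framework", "design"].any (fun k => PySem.Str.isIn k h)) = true
      · rw [pvBestLoop_hit h pvS2 2 5 (by decide) (by simpa [pvS2] using h2) (by omega),
            pvBestLoop_noupdate h pvS3 2 (by decide), pvBestLoop_noupdate h pvS4 2 (by decide),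
            if_pos h2]
        simp [pvLabels]
      · have h2' : (["method", "approach", "model", "architecture", "system", "proposed", "framework", "design"].any (fun k => PySem.Str.isIn k h)) = false := by
          rw [Bool.not_eq_true] at h2; exact h2
        rw [pvBestLoop_miss h pvS2 5 (by simpa [pvS2] using h2'), if_neg h2]
        by_cases h3 : (["result", "experiment", "evaluation", "performance", "benchmark", "analysis", "ablation"].any (fun k => PySem.Str.isIn k h)) = true
        · rw [pvBestLoop_hit h pvS3 3 5 (by decide) (by simpa [pvS3] using h3) (by omega),
              pvBestLoop_noupdate h pvS4 3 (by decide), if_pos h3]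
          simp [pvLabels]
        · have h3' : (["result", "experiment", "evaluation", "performance", "benchmark", "analysis", "ablation"].any (fun k => PySem.Str.isIn k h)) = false := by
            rw [Bool.not_eq_true] at h3; exact h3
          rw [pvBestLoop_miss h pvS3 5 (by simpa [pvS3] using h3'), if_neg h3]
          by_cases h4 : (["conclusion", "contribution", "summary", "discussion", "future"].any (fun k => PySem.Str.isIn k h)) = true
          · rw [pvBestLoop_hit h pvS4 4 5 (by decide) (by simpa [pvS4] using h4) (by omega),
                if_pos h4]
            simp [pvLabels]
          · have h4' : (["conclusion", "contribution", "summary", "discussion", "future"].any (fun k => PySem.Str.isIn k h)) = false := by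
              rw [Bool.not_eq_true] at h4; exact h4
            rw [pvBestLoop_miss h pvS4 5 (by simpa [pvS4] using h4'), if_neg h4]
            simp [pvLabels]
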